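-- pv_equiv track=rewrite | github.com/greatroboticslab/embodiedAI | VideoAnalysis/correlation/extract_topics.py | _ranges_to_indices
-- ===== SOURCE A (Python) =====
-- from typing import List, Dict, Any, Tuple, Callable, Optional
--
-- def _clamp(v: int, lo: int, hi: int) -> int:
--     return max(lo, min(hi, v))
--
-- def _ranges_to_indices(ranges: List[Dict[str, Any]], n: int) -> List[int]:
--     out = set()
--     for r in ranges or []:
--         try:
--             a = int(r.get("start_idx")); b = int(r.get("end_idx"))
--         except Exception:
--             continue
--         if a > b: a, b = b, a
--         a = _clamp(a, 0, n-1); b = _clamp(b, 0, n-1)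
--         out.update(range(a, b+1))
--     return sorted(out)
-- ===== SOURCE B (Python) =====
-- from typing import List, Dict, Any
--
-- def _clamp(v: int, lo: int, hi: int) -> int:
--     return max(lo, min(hi, v))
--
-- def _ranges_to_indices(ranges: List[Dict[str, Any]], n: int) -> List[int]:
--     # Collect each request as one clamped interval, merge the intervals after
--     # sorting by start, then enumerate each merged interval exactly once.
--     ivs = []
--     for r in ranges or []:
--         try:
--             a = int(r.get("start_idx")); b = int(r.get("end_idx"))
--         except Exception:
--             continue
--         if a > b: a, b = b, a
--         ivs.append((_clamp(a, 0, n - 1), _clamp(b, 0, n - 1)))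
--     ivs.sort(key=lambda p: p[0])
--     merged = []
--     cur = None
--     for lo, hi in ivs:
--         if cur is None:
--             cur = (lo, hi)
--         elif lo <= cur[1] + 1:
--             cur = (cur[0], max(cur[1], hi))
--         else:
--             merged.append(cur)
--             cur = (lo, hi)
--     if cur is not None:
--         merged.append(cur)
--     res = []
--     for lo, hi in merged:
--         res.extend(range(lo, hi + 1))
--     return res
-- ===== Notes on version B (the rewrite author's own statement) =====
-- stated objective: alternative
-- what changed: B replaces A's element-wise hash-set accumulation plus final sort (A inserts every index of every range into a set, then sorts) by interval merging: it clamps each request to one interval, sorts the intervals by start, merges overlapping/adjacent ones in one scan, and enumerates each merged interval once, doing O(1) work per range plus O(1) per output index instead of per-index set insertions.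
import Mathlib
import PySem

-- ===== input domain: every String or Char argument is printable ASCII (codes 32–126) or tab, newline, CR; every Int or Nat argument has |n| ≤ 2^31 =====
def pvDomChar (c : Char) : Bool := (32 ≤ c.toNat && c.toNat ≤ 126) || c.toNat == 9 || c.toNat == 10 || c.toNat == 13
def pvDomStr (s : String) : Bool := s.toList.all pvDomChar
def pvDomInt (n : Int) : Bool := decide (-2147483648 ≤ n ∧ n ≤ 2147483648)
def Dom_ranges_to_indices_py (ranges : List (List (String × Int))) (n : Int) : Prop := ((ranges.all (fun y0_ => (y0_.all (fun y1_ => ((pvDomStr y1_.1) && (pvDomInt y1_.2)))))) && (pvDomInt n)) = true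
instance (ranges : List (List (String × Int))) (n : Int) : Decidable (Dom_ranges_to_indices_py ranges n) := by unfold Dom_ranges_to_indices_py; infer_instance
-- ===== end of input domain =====

-- B merges the clamped intervals after sorting by start and enumerates each merged
-- interval once, instead of A's per-index set accumulation followed by a sort.

-- ===== PORT A =====
-- helper shared by both Pythons: _clamp
def pvClamp (v lo hi : Int) : Int := max lo (min hi v)

-- helper shared by both Pythons: the parsing done for one dict r in the loop body
-- (r.get of both keys — int() of a missing key raises, caught as 'continue' = none —
--  then the swap 'if a > b' and the two clamps to [0, n-1])
def pvParse (n : Int) (r : List (String × Int)) : Option (Int × Int) :=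
  match (PySem.Dict.mk r).get? "start_idx", (PySem.Dict.mk r).get? "end_idx" with
  | some a, some b =>
      let ab := if a > b then (b, a) else (a, b)
      some (pvClamp ab.1 0 (n - 1), pvClamp ab.2 0 (n - 1))
  | _, _ => none

def ranges_to_indices_py (ranges : List (List (String × Int))) (n : Int) : List Int :=
  PySem.List.sorted
    (ranges.foldl (fun out r =>
      match pvParse n r with
      | some p => PySem.Set.update out (PySem.List.pyRange p.1 (p.2 + 1) 1)
      | none   => out) PySem.Set.empty)
    (fun x => x) false

-- ===== PORT B =====
-- one merge-loop step: state = (merged so far, current open interval)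
def pvMergeStep (s : List (Int × Int) × Option (Int × Int)) (p : Int × Int) :
    List (Int × Int) × Option (Int × Int) :=
  match s.2 with
  | none => (s.1, some p)
  | some c => if p.1 ≤ c.2 + 1 then (s.1, some (c.1, max c.2 p.2))
              else (s.1 ++ [c], some p)

-- 'for lo, hi in merged: res.extend(range(lo, hi+1))'
def pvExpand (l : List (Int × Int)) : List Int :=
  l.flatMap (fun p => PySem.List.pyRange p.1 (p.2 + 1) 1)

def ranges_to_indices_py_alt (ranges : List (List (String × Int))) (n : Int) : List Int :=
  let ivs := ranges.foldl (fun acc r =>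
      match pvParse n r with
      | some p => acc ++ [p]
      | none   => acc) []
  let sivs := PySem.List.sorted ivs (fun p => p.1) false
  let st := sivs.foldl pvMergeStep ([], none)
  pvExpand (st.1 ++ st.2.toList)

-- ===== PRECONDITION & SPEC =====
def Spec_ranges_to_indices_py (ranges : List (List (String × Int))) (n : Int) (out : List Int) : Prop := out = ranges_to_indices_py_alt ranges n
instance (ranges : List (List (String × Int))) (n : Int) (out : List Int) : Decidable (Spec_ranges_to_indices_py ranges n out) := by unfold Spec_ranges_to_indices_py; infer_instance

-- ===== CLAIM (what is proved, stated in full; the proofs are below) =====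
def Claim_equal_ranges_to_indices_py : Prop := ∀ (ranges : List (List (String × Int))) (n : Int), Dom_ranges_to_indices_py ranges n → Spec_ranges_to_indices_py ranges n (ranges_to_indices_py ranges n)

-- ===== LEMMAS AND PROOFS =====

-- the parsed interval is always clamped-ordered: lo ≤ hi
theorem pvParse_le {n : Int} {r : List (String × Int)} {p : Int × Int}
    (h : pvParse n r = some p) : p.1 ≤ p.2 := by
  unfold pvParse at h
  rcases h1 : (PySem.Dict.mk r).get? "start_idx" with _ | a <;>
    rcases h2 : (PySem.Dict.mk r).get? "end_idx" with _ | b <;>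
      rw [h1, h2] at h <;> simp only [] at h
  · cases h
  · cases h
  · cases h
  · injection h with h
    subst h
    by_cases hab : a > b <;> simp only [hab, pvClamp] <;> simp <;> omega

-- extraction fold appends only
theorem extract_acc (n : Int) (ranges : List (List (String × Int)))
    (acc : List (Int × Int)) :
    ranges.foldl (fun acc r =>
      match pvParse n r with
      | some p => acc ++ [p]
      | none   => acc) acc
    = acc ++ ranges.foldl (fun acc r =>
      match pvParse n r with
      | some p => acc ++ [p]
      | none   => acc) [] := by
  induction ranges generalizing acc with
  | nil => simp
  | cons r t ih =>
      simp only [List.foldl_cons]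
      rcases h : pvParse n r with _ | p <;> simp only [h]
      · exact ih acc
      · rw [ih (acc ++ [p]), ih ([] ++ [p])]
        simp

-- membership in A's accumulated set = membership in some extracted interval
theorem setFold_mem (n : Int) (ranges : List (List (String × Int)))
    (s : PySem.Set Int) (x : Int) :
    (x ∈ ranges.foldl (fun out r =>
        match pvParse n r with
        | some p => PySem.Set.update out (PySem.List.pyRange p.1 (p.2 + 1) 1)
        | none   => out) s)
    ↔ x ∈ s ∨ ∃ p ∈ ranges.foldl (fun acc r =>
        match pvParse n r with
        | some p => acc ++ [p]
        | none   => acc) [], p.1 ≤ x ∧ x ≤ p.2 := by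
  induction ranges generalizing s with
  | nil => simp
  | cons r t ih =>
      simp only [List.foldl_cons]
      rcases h : pvParse n r with _ | p <;> simp only [h]
      · exact ih s
      · rw [extract_acc n t ([] ++ [p]), ih (PySem.Set.update s (PySem.List.pyRange p.1 (p.2 + 1) 1))]
        simp only [PySem.Set.mem_update, PySem.List.mem_pyRange_one, List.nil_append,
          List.mem_append, List.mem_singleton]
        constructor
        · rintro ((hs | ⟨h1, h2⟩) | ⟨q, hq, h1, h2⟩)
          · exact Or.inl hs
          · exact Or.inr ⟨p, Or.inl rfl, h1, by omega⟩
          · exact Or.inr ⟨q, Or.inr hq, h1, h2⟩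
        · rintro (hs | ⟨q, (rfl | hq), h1, h2⟩)
          · exact Or.inl (Or.inl hs)
          · exact Or.inl (Or.inr ⟨h1, by omega⟩)
          · exact Or.inr ⟨q, hq, h1, h2⟩

theorem setFold_nodup (n : Int) (ranges : List (List (String × Int)))
    (s : PySem.Set Int) (hs : s.Nodup) :
    (ranges.foldl (fun out r =>
        match pvParse n r with
        | some p => PySem.Set.update out (PySem.List.pyRange p.1 (p.2 + 1) 1)
        | none   => out) s).Nodup := by
  induction ranges generalizing s with
  | nil => exact hs
  | cons r t ih =>
      simp only [List.foldl_cons]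
      rcases h : pvParse n r with _ | p <;> simp only [h]
      · exact ih _ hs
      · exact ih _ (PySem.Set.nodup_update _ _ hs)

-- merge fold appends only (to the first component)
theorem merge_acc (ivs : List (Int × Int)) (acc : List (Int × Int))
    (c : Option (Int × Int)) :
    ivs.foldl pvMergeStep (acc, c)
    = (acc ++ (ivs.foldl pvMergeStep ([], c)).1, (ivs.foldl pvMergeStep ([], c)).2) := by
  induction ivs generalizing acc c with
  | nil => simp
  | cons p t ih =>
      simp only [List.foldl_cons]
      rcases c with _ | q
      · simp only [pvMergeStep]
        exact ih acc (some p)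
      · simp only [pvMergeStep]
        split
        · exact ih acc _
        · rw [ih (acc ++ [q]) (some p), ih ([] ++ [q]) (some p)]
          simp

-- the result of running the merge loop from an open interval (a,b)
def pvMergeRun (a b : Int) (ivs : List (Int × Int)) : List Int :=
  pvExpand ((ivs.foldl pvMergeStep ([], some (a, b))).1
            ++ (ivs.foldl pvMergeStep ([], some (a, b))).2.toList)

-- core: on start-sorted, lo<=hi intervals the merge loop produces a strictly
-- increasing enumeration of the union, all elements >= a
theorem mergeRun_nil (a b : Int) :
    pvMergeRun a b [] = PySem.List.pyRange a (b + 1) 1 := by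
  simp [pvMergeRun, pvExpand]

theorem mergeRun_spec (ivs : List (Int × Int)) :
    ∀ a b : Int, a ≤ b → (∀ p ∈ ivs, p.1 ≤ p.2) → (∀ p ∈ ivs, a ≤ p.1) →
    ivs.Pairwise (fun p q => p.1 ≤ q.1) →
    (pvMergeRun a b ivs).Pairwise (· < ·) ∧
    (∀ x ∈ pvMergeRun a b ivs, a ≤ x) ∧
    (∀ x, x ∈ pvMergeRun a b ivs ↔ (a ≤ x ∧ x ≤ b) ∨ ∃ p ∈ ivs, p.1 ≤ x ∧ x ≤ p.2) := by
  induction ivs with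
  | nil =>
      intro a b hab _ _ _
      rw [mergeRun_nil]
      refine ⟨PySem.List.pairwise_lt_pyRange_one _ _, ?_, ?_⟩
      · intro x hx
        exact (PySem.List.mem_pyRange_one.mp hx).1
      · intro x
        rw [PySem.List.mem_pyRange_one]
        constructor
        · rintro ⟨h1, h2⟩
          exact Or.inl ⟨h1, by omega⟩
        · rintro (⟨h1, h2⟩ | ⟨p, hp, h1, h2⟩)
          · exact ⟨h1, by omega⟩
          · simp at hp
  | cons q t ih =>
      intro a b hab hle hge hpw
      have hq2 : q.1 ≤ q.2 := hle q (by simp)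
      have haq : a ≤ q.1 := hge q (by simp)
      have hle' : ∀ p ∈ t, p.1 ≤ p.2 := fun p hp => hle p (by simp [hp])
      have hqt : ∀ p ∈ t, q.1 ≤ p.1 := fun p hp => (List.pairwise_cons.mp hpw).1 p hp
      have hpw' := (List.pairwise_cons.mp hpw).2
      by_cases hc : q.1 ≤ b + 1
      · -- absorb q into the open interval
        have hrun : pvMergeRun a b (q :: t) = pvMergeRun a (max b q.2) t := by
          unfold pvMergeRun
          simp only [List.foldl_cons, pvMergeStep]
          rw [if_pos hc]
        obtain ⟨hp1, hp2, hp3⟩ := ih a (max b q.2) (le_trans hab (le_max_left _ _))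
          hle' (fun p hp => le_trans haq (hqt p hp)) hpw'
        rw [hrun]
        refine ⟨hp1, hp2, fun x => ?_⟩
        rw [hp3 x]
        constructor
        · rintro (⟨h1, h2⟩ | ⟨p, hp, h1, h2⟩)
          · by_cases hxb : x ≤ b
            · exact Or.inl ⟨h1, hxb⟩
            · exact Or.inr ⟨q, by simp, by omega, by omega⟩
          · exact Or.inr ⟨p, by simp [hp], h1, h2⟩
        · rintro (⟨h1, h2⟩ | ⟨p, hp, h1, h2⟩)
          · exact Or.inl ⟨h1, by omega⟩
          · rcases List.mem_cons.mp hp with rfl | hp'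
            · exact Or.inl ⟨by omega, by omega⟩
            · exact Or.inr ⟨p, hp', h1, h2⟩
      · -- emit [a,b], reopen with q
        have hrun : pvMergeRun a b (q :: t)
            = PySem.List.pyRange a (b + 1) 1 ++ pvMergeRun q.1 q.2 t := by
          unfold pvMergeRun
          simp only [List.foldl_cons, pvMergeStep]
          rw [if_neg hc]
          rw [merge_acc t ([] ++ [(a, b)]) (some q)]
          simp [pvExpand]
        obtain ⟨hp1, hp2, hp3⟩ := ih q.1 q.2 hq2 hle' hqt hpw'
        rw [hrun]
        refine ⟨?_, ?_, fun x => ?_⟩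
        · rw [List.pairwise_append]
          refine ⟨PySem.List.pairwise_lt_pyRange_one _ _, hp1, fun x hx y hy => ?_⟩
          have hx' := PySem.List.mem_pyRange_one.mp hx
          have hy' := hp2 y hy
          omega
        · intro x hx
          rcases List.mem_append.mp hx with h | h
          · have := PySem.List.mem_pyRange_one.mp h
            omega
          · have := hp2 x h
            omega
        · rw [List.mem_append, PySem.List.mem_pyRange_one, hp3 x]
          constructor
          · rintro (⟨h1, h2⟩ | ⟨h1, h2⟩ | ⟨p, hp, h1, h2⟩)
            · exact Or.inl ⟨h1, by omega⟩
            · exact Or.inr ⟨q, by simp, h1, h2⟩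
            · exact Or.inr ⟨p, by simp [hp], h1, h2⟩
          · rintro (⟨h1, h2⟩ | ⟨p, hp, h1, h2⟩)
            · exact Or.inl ⟨h1, by omega⟩
            · rcases List.mem_cons.mp hp with rfl | hp'
              · exact Or.inr (Or.inl ⟨h1, h2⟩)
              · exact Or.inr (Or.inr ⟨p, hp', h1, h2⟩)

-- ===== VERDICT (by name: the statement is the Claim_ definition above) =====
theorem ranges_to_indices_py_spec : Claim_equal_ranges_to_indices_py := by
  intro ranges n _
  unfold Spec_ranges_to_indices_py ranges_to_indices_py ranges_to_indices_py_alt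
  dsimp only
  set ivs := ranges.foldl (fun acc r =>
      match pvParse n r with
      | some p => acc ++ [p]
      | none   => acc) [] with hivs
  set out := ranges.foldl (fun out r =>
      match pvParse n r with
      | some p => PySem.Set.update out (PySem.List.pyRange p.1 (p.2 + 1) 1)
      | none   => out) PySem.Set.empty with hout
  have hmemout : ∀ x, x ∈ out ↔ ∃ p ∈ ivs, p.1 ≤ x ∧ x ≤ p.2 := by
    intro x
    rw [hout, setFold_mem]
    simp [PySem.Set.empty, hivs]
  have hnodup : out.Nodup := setFold_nodup n ranges _ (by simp [PySem.Set.empty])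
  have hivs_le : ∀ p ∈ ivs, p.1 ≤ p.2 := by
    rw [hivs]
    have key : ∀ (rs : List (List (String × Int))) (acc : List (Int × Int)),
        (∀ p ∈ acc, p.1 ≤ p.2) →
        ∀ p ∈ rs.foldl (fun acc r =>
          match pvParse n r with
          | some p => acc ++ [p]
          | none   => acc) acc, p.1 ≤ p.2 := by
      intro rs
      induction rs with
      | nil => intro acc h; simpa using h
      | cons r t ih =>
          intro acc h
          simp only [List.foldl_cons]
          rcases hr : pvParse n r with _ | p <;> simp only [hr]
          · exact ih acc h
          · refine ih _ (fun q hq => ?_)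
            rcases List.mem_append.mp hq with h' | h'
            · exact h q h'
            · simp at h'
              subst h'
              exact pvParse_le hr
    exact key ranges [] (by simp)
  set sivs := PySem.List.sorted ivs (fun p => p.1) false with hsivs
  have hsmem : ∀ p, p ∈ sivs ↔ p ∈ ivs := fun p => PySem.List.mem_sorted _ _ _ _
  have hspw : sivs.Pairwise (fun p q => p.1 ≤ q.1) := PySem.List.sorted_pairwise _ _
  rcases hsv : sivs with _ | ⟨q, t⟩
  · -- no intervals at all: the set is empty and B emits nothing
    have hivsnil : ivs = [] := by
      rw [hsivs] at hsv
      exact (PySem.List.sorted_eq_nil_iff _ _ _).mp hsv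
    have houtnil : out = [] := by
      rcases hx : out with _ | ⟨y, ys⟩
      · rfl
      · exfalso
        have hy : y ∈ out := by rw [hx]; simp
        rw [hmemout y, hivsnil] at hy
        simp at hy
    rw [houtnil]
    simp [pvExpand]
    exact (PySem.List.sorted_eq_nil_iff _ _ _).mpr rfl
  · -- at least one interval: run the merge loop from q
    have hq2 : q.1 ≤ q.2 := hivs_le q ((hsmem q).mp (by rw [hsv]; simp))
    have htle : ∀ p ∈ t, p.1 ≤ p.2 := fun p hp =>
      hivs_le p ((hsmem p).mp (by rw [hsv]; simp [hp]))
    rw [hsv] at hspw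
    have hqt : ∀ p ∈ t, q.1 ≤ p.1 := (List.pairwise_cons.mp hspw).1
    obtain ⟨hpw, _, hmem⟩ := mergeRun_spec t q.1 q.2 hq2 htle hqt
      (List.pairwise_cons.mp hspw).2
    have hloop : List.foldl pvMergeStep ([], none) (q :: t)
        = List.foldl pvMergeStep ([], some (q.1, q.2)) t := by
      simp [pvMergeStep]
    rw [hloop]
    have hres : pvExpand ((List.foldl pvMergeStep ([], some (q.1, q.2)) t).1 ++
        (List.foldl pvMergeStep ([], some (q.1, q.2)) t).2.toList)
        = pvMergeRun q.1 q.2 t := rfl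
    rw [hres]
    refine PySem.List.sorted_eq_of_perm_of_pairwise_lt _ _ _ ?_ hpw
    rw [List.perm_ext_iff_of_nodup (List.Pairwise.nodup hpw) hnodup]
    intro x
    rw [hmem x, hmemout x]
    constructor
    · rintro (⟨h1, h2⟩ | ⟨p, hp, h1, h2⟩)
      · exact ⟨q, (hsmem q).mp (by rw [hsv]; simp), h1, h2⟩
      · exact ⟨p, (hsmem p).mp (by rw [hsv]; simp [hp]), h1, h2⟩
    · rintro ⟨p, hp, h1, h2⟩
      have hps : p ∈ sivs := (hsmem p).mpr hp
      rw [hsv] at hps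
      rcases List.mem_cons.mp hps with rfl | hp'
      · exact Or.inl ⟨h1, h2⟩
      · exact Or.inr ⟨p, hp', h1, h2⟩
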